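-- pv_equiv track=rewrite | github.com/HashemBader/AS-hangman | Problem 2/utils.py | letters_available
-- ===== SOURCE A (Python) =====
-- from typing import List
--
-- def letters_available(user_guesses: List[str]):
--     # Write your code here
--     count = -1
--     letters_remaining = "abcdefghijklmnopqrstuvwxyz"
--     for q in user_guesses:
--         for z in letters_remaining:
--             count = count + 1
--             if q == z:
--                 letters_remaining = letters_remaining[0: count] + letters_remaining[count + 1:]
--         count = -1
--     return letters_remaining.lower()
-- ===== SOURCE B (Python) =====
-- def letters_available(user_guesses):
--     guessed = set(user_guesses)
--     return ''.join(c for c in "abcdefghijklmnopqrstuvwxyz" if c not in guessed)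
-- ===== Notes on version B (the rewrite author's own statement) =====
-- stated objective: idiomatic
-- what changed: Replaces the nested loop over guesses with index-tracking and string splicing by one filtering pass over the fixed alphabet against a set of the guesses, dropping the redundant final .lower().
import Mathlib
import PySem

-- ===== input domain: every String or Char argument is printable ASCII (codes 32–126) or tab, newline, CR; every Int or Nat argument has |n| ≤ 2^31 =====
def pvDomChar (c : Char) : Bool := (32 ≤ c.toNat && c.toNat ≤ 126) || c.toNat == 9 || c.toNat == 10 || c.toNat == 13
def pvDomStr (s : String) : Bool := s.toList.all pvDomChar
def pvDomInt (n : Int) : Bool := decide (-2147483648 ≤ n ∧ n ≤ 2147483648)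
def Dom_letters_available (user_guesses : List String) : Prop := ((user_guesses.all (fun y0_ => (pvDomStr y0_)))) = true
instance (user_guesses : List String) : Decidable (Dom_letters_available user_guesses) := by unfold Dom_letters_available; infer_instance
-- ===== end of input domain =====

-- B filters the alphabet once against a set of the guesses instead of A's nested scan-and-splice; idiomatic.

-- ===== PORT A =====
-- inner 'for z in letters_remaining' loop: iterates over the snapshot of the string,
-- increments count, and splices letters_remaining at index count on a match.
def lettersInnerA (q : String) : List Char → Int → List Char → Int × List Char
  | [], count, rem => (count, rem)
  | z :: zs, count, rem =>
    let count := count + 1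
    if q == String.ofList [z] then
      lettersInnerA q zs count
        (PySem.List.slice rem (some 0) (some count) ++ PySem.List.slice rem (some (count + 1)) none)
    else
      lettersInnerA q zs count rem

def letters_available (user_guesses : List String) : String :=
  let s := user_guesses.foldl
    (fun (st : Int × List Char) q =>
      let r := lettersInnerA q st.2 st.1 st.2
      (-1, r.2))
    (-1, "abcdefghijklmnopqrstuvwxyz".toList)
  PySem.Str.lower (String.ofList s.2)

-- ===== PORT B =====
def letters_available_alt (user_guesses : List String) : String :=
  let guessed := PySem.Set.ofList user_guesses
  String.ofList (("abcdefghijklmnopqrstuvwxyz".toList).filter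
    (fun c => !(PySem.Set.contains guessed (String.ofList [c]))))

-- ===== PRECONDITION & SPEC =====
def Spec_letters_available (user_guesses : List String) (out : String) : Prop := out = letters_available_alt user_guesses
instance (user_guesses : List String) (out : String) : Decidable (Spec_letters_available user_guesses out) := by unfold Spec_letters_available; infer_instance

-- ===== CLAIM (what is proved, stated in full; the proofs are below) =====
def Claim_equal_letters_available : Prop := ∀ (user_guesses : List String), Dom_letters_available user_guesses → Spec_letters_available user_guesses (letters_available user_guesses)

-- ===== LEMMAS AND PROOFS =====

-- once the guessed letter has been removed, no later character matches, so rem never changes again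
theorem lettersInnerA_no_match (q : String) (iter : List Char) (count : Int) (rem : List Char)
    (h : ∀ c ∈ iter, ¬(q == String.ofList [c])) :
    (lettersInnerA q iter count rem).2 = rem := by
  induction iter generalizing count with
  | nil => rfl
  | cons z zs ih =>
    have hz : ¬(q == String.ofList [z]) := h z (by simp)
    simp only [lettersInnerA, hz]
    exact ih _ (fun c hc => h c (by simp [hc]))

-- the inner loop on a duplicate-free string removes exactly the characters equal to q
theorem lettersInnerA_filter (q : String) (suf pre : List Char)
    (hnd : (pre ++ suf).Nodup) (hpre : ∀ c ∈ pre, ¬(q == String.ofList [c])) :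
    (lettersInnerA q suf ((pre.length : Int) - 1) (pre ++ suf)).2 =
      (pre ++ suf).filter (fun c => !(q == String.ofList [c])) := by
  induction suf generalizing pre with
  | nil =>
    simp only [lettersInnerA, List.append_nil]
    exact (List.filter_eq_self.mpr (fun c hc => by simp [hpre c hc])).symm
  | cons z zs ih =>
    have hcount : (pre.length : Int) - 1 + 1 = (pre.length : Int) := by ring
    simp only [lettersInnerA]
    rw [hcount]
    by_cases hq : (q == String.ofList [z]) = true
    · rw [if_pos hq]
      have hs1 : PySem.List.slice (pre ++ z :: zs) (some 0) (some (pre.length : Int)) = pre := by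
        rw [PySem.List.slice_toNat _ (by omega) (by omega)]
        simp
      have hs2 : PySem.List.slice (pre ++ z :: zs) (some ((pre.length : Int) + 1)) = zs := by
        rw [PySem.List.slice_from _ (by omega)]
        have h3 : (((pre.length : Int) + 1).toNat) = (pre ++ [z]).length := by simp
        rw [h3]
        have h4 : pre ++ z :: zs = (pre ++ [z]) ++ zs := by simp
        rw [h4, List.drop_left]
      have hqz : q = String.ofList [z] := by simpa using hq
      have hzs : ∀ c ∈ zs, ¬((q == String.ofList [c]) = true) := by
        intro c hc hb
        have h5 : q = String.ofList [c] := by simpa using hb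
        have hzc : z = c := by
          have h2 := congrArg String.toList (hqz.symm.trans h5)
          simpa using h2
        subst hzc
        have h6 : z ∉ zs := by
          have h7 := hnd.of_append_right
          simpa using (List.nodup_cons.mp h7).1
        exact h6 hc
      rw [hs1, hs2, lettersInnerA_no_match q zs _ _ hzs]
      have hfz : (!(q == String.ofList [z])) = false := by simp [hq]
      rw [List.filter_append]
      simp only [List.filter_cons, hfz, Bool.false_eq_true, if_false]
      rw [List.filter_eq_self.mpr (fun c hc => by simp [hpre c hc]),
          List.filter_eq_self.mpr (fun c hc => by simp [hzs c hc])]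
    · rw [if_neg hq]
      have hcount2 : (pre.length : Int) = ((pre ++ [z]).length : Int) - 1 := by
        simp
      have hlist : pre ++ z :: zs = (pre ++ [z]) ++ zs := by simp
      rw [hcount2, hlist, ih (pre ++ [z]) (by rw [← hlist]; exact hnd)
        (fun c hc => by
          rcases List.mem_append.mp hc with h1 | h1
          · exact hpre c h1
          · simpa [List.mem_singleton.mp h1] using hq)]

-- the outer loop keeps (count, rem) with count reset to -1; rem stays duplicate-free and
-- accumulates the filters of the guesses processed so far
theorem lettersOuter (gs : List String) (rem : List Char) (hnd : rem.Nodup) :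
    (gs.foldl
      (fun (st : Int × List Char) q =>
        let r := lettersInnerA q st.2 st.1 st.2
        (-1, r.2))
      (-1, rem)).2 =
      rem.filter (fun c => gs.all (fun q => !(q == String.ofList [c]))) := by
  induction gs generalizing rem with
  | nil => simp
  | cons q qs ih =>
    simp only [List.foldl_cons]
    have h1 : (lettersInnerA q rem (-1) rem).2 = rem.filter (fun c => !(q == String.ofList [c])) := by
      have := lettersInnerA_filter q rem [] (by simpa using hnd) (by simp)
      simpa using this
    rw [h1, ih _ (hnd.filter _), List.filter_filter]
    exact List.filter_congr (fun c _ => by simp [Bool.and_comm])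

-- ===== VERDICT (by name: the statement is the Claim_ definition above) =====
-- .lower() is the identity on characters drawn from the lowercase alphabet
theorem lower_of_lowercase (l : List Char) (h : ∀ c ∈ l, PySem.Chars.lowerChar c = c) :
    PySem.Str.lower (String.ofList l) = String.ofList l := by
  have h1 : (PySem.Str.lower (String.ofList l)).toList = l := by
    rw [PySem.Str.toList_lower]
    simp only [String.toList_ofList]
    simp only [PySem.Chars.lower]
    exact (List.map_congr_left h).trans (List.map_id _)
  have h2 := congrArg String.ofList h1
  rwa [String.ofList_toList] at h2

-- the alphabet literal as an explicit character list, for cheap kernel evaluation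
def alphaChars : List Char := ['a','b','c','d','e','f','g','h','i','j','k','l','m','n','o','p','q','r','s','t','u','v','w','x','y','z']

theorem alpha_toList : "abcdefghijklmnopqrstuvwxyz".toList = alphaChars := by rfl

theorem alpha_nodup : ("abcdefghijklmnopqrstuvwxyz".toList).Nodup := by
  rw [alpha_toList]; decide

theorem halpha_all : alphaChars.all (fun c => PySem.Chars.lowerChar c == c) = true := by decide

theorem halpha_lower : ∀ c ∈ "abcdefghijklmnopqrstuvwxyz".toList, PySem.Chars.lowerChar c = c := by
  rw [alpha_toList]
  intro c hc
  exact eq_of_beq (List.all_eq_true.mp halpha_all c hc)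

theorem letters_available_spec : Claim_equal_letters_available := by
  intro gs _
  show letters_available gs = letters_available_alt gs
  dsimp only [letters_available, letters_available_alt]
  rw [lettersOuter gs _ alpha_nodup]
  have hmem : ∀ c : Char,
      (gs.all (fun q => !(q == String.ofList [c]))) =
        !(PySem.Set.contains (PySem.Set.ofList gs) (String.ofList [c])) := by
    intro c
    by_cases h : String.ofList [c] ∈ gs
    · have h1 : (PySem.Set.contains (PySem.Set.ofList gs) (String.ofList [c])) = true := by
        simpa [PySem.Set.contains] using (PySem.Set.mem_ofList gs (String.ofList [c])).mpr h
      rw [h1]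
      simp only [Bool.not_true, List.all_eq_false]
      exact ⟨_, h, by simp⟩
    · have h1 : (PySem.Set.contains (PySem.Set.ofList gs) (String.ofList [c])) = false := by
        have h2 : String.ofList [c] ∉ PySem.Set.ofList gs := fun hm =>
          h ((PySem.Set.mem_ofList gs (String.ofList [c])).mp hm)
        simpa [PySem.Set.contains] using h2
      rw [h1]
      simp only [Bool.not_false, List.all_eq_true]
      intro q hq
      simp only [Bool.not_eq_eq_eq_not, Bool.not_true]
      exact beq_eq_false_iff_ne.mpr (fun he => h (he ▸ hq))
  rw [List.filter_congr (fun c _ => hmem c)]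
  -- every kept character comes from the lowercase alphabet, so .lower() is the identity
  exact lower_of_lowercase _ (fun c hc =>
    halpha_lower c (List.mem_of_mem_filter hc))
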